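-- pv_equiv track=rewrite | github.com/JackFleming48/acit1515 | week_5/jackson-fleming-lab5.py | check_up_low
-- ===== SOURCE A (Python) =====
-- def check_up_low(pword):
--     is_lower = False
--     is_upper = False
--
--     for char in pword:
--         if char.isupper():
--             is_upper = True
--         elif char.islower():
--             is_lower = True
--     if is_upper and is_lower:
--             return True
--     else:
--         return False
-- ===== SOURCE B (Python) =====
-- def check_up_low(pword):
--     return any(c.isupper() for c in pword) and any(c.islower() for c in pword)
-- ===== Notes on version B (the rewrite author's own statement) =====
-- stated objective: idiomatic
-- what changed: Replaces the single flag-accumulating loop with two independent short-circuiting any() existence scans conjoined.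
import Mathlib
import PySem

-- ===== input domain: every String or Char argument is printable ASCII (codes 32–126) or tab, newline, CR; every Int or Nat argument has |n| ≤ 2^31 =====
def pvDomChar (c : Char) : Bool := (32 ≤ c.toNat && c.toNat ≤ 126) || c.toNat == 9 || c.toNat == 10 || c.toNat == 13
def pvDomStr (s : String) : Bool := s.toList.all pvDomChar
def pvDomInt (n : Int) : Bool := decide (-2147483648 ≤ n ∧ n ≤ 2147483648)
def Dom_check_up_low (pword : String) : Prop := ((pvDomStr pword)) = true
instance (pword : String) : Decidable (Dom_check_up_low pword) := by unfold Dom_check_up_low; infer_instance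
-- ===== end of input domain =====

-- B replaces A's single flag-setting loop by two independent any() existence scans (idiomatic; same return value).
-- ===== PORT A =====
def check_up_low (pword : String) : Bool :=
  let st := pword.toList.foldl (fun (flags : Bool × Bool) char =>
    if PySem.Chars.isupper char then (flags.1, true)
    else if PySem.Chars.islower char then (true, flags.2)
    else flags) (false, false)
  if st.2 && st.1 then true else false

-- ===== PORT B =====
def check_up_low_alt (pword : String) : Bool :=
  (pword.toList.any (fun c => PySem.Chars.isupper c)) &&
  (pword.toList.any (fun c => PySem.Chars.islower c))

-- ===== PRECONDITION & SPEC =====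
def Spec_check_up_low (pword : String) (out : Bool) : Prop := out = check_up_low_alt pword
instance (pword : String) (out : Bool) : Decidable (Spec_check_up_low pword out) := by unfold Spec_check_up_low; infer_instance

-- ===== CLAIM (what is proved, stated in full; the proofs are below) =====
def Claim_equal_check_up_low : Prop := ∀ (pword : String), Dom_check_up_low pword → Spec_check_up_low pword (check_up_low pword)

-- ===== LEMMAS AND PROOFS =====

lemma flags_inv (l : List Char) (lo up : Bool) :
    (l.foldl (fun (flags : Bool × Bool) char =>
      if PySem.Chars.isupper char then (flags.1, true)
      else if PySem.Chars.islower char then (true, flags.2)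
      else flags) (lo, up))
    = (lo || l.any (fun c => PySem.Chars.islower c),
       up || l.any (fun c => PySem.Chars.isupper c)) := by
  induction l generalizing lo up with
  | nil => simp
  | cons c t ih =>
    simp only [List.foldl_cons, List.any_cons]
    by_cases hu : PySem.Chars.isupper c
    · have hl : PySem.Chars.islower c = false := by
        revert hu
        unfold PySem.Chars.isupper PySem.Chars.islower
        simp [Char.le_def, UInt32.le_iff_toNat_le]
        omega
      simp [hu, hl, ih]
    · by_cases hl : PySem.Chars.islower c
      · simp [hu, hl, ih]
      · simp [hu, hl, ih]

-- ===== VERDICT (by name: the statement is the Claim_ definition above) =====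
theorem check_up_low_spec : Claim_equal_check_up_low := by
  intro pword _
  unfold Spec_check_up_low check_up_low check_up_low_alt
  rw [flags_inv]
  simp only [Bool.false_or]
  cases h1 : pword.toList.any (fun c => PySem.Chars.islower c) <;>
    cases h2 : pword.toList.any (fun c => PySem.Chars.isupper c) <;> simp [h1, h2]
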